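-- pv_equiv track=rewrite | github.com/Otin2/Generador-de-Subredes-VLSM | Redes.py | obtener_mascara_decimal
-- ===== SOURCE A (Python) =====
-- from typing import List, Tuple, Optional
--
-- def obtener_mascara_decimal(prefijo: int) -> List[int]:
--     mascara = []
--     for i in range(4):
--         if prefijo >= 8:
--             mascara.append(255)
--             prefijo -= 8
--         elif prefijo > 0:
--             mascara.append(256 - 2 ** (8 - prefijo))
--             prefijo = 0
--         else:
--             mascara.append(0)
--     return mascara
-- ===== SOURCE B (Python) =====
-- def obtener_mascara_decimal(prefijo):
--     p = max(0, min(prefijo, 32))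
--     m = ((1 << p) - 1) << (32 - p)
--     return [(m >> (24 - 8 * i)) & 0xFF for i in range(4)]
-- ===== Notes on version B (the rewrite author's own statement) =====
-- stated objective: idiomatic
-- what changed: Replaces the greedy per-octet subtract-8 loop with a single packed integer mask of p leading ones built from the clamped prefix, from which the four octets are extracted by shift-and-mask.
import Mathlib
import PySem

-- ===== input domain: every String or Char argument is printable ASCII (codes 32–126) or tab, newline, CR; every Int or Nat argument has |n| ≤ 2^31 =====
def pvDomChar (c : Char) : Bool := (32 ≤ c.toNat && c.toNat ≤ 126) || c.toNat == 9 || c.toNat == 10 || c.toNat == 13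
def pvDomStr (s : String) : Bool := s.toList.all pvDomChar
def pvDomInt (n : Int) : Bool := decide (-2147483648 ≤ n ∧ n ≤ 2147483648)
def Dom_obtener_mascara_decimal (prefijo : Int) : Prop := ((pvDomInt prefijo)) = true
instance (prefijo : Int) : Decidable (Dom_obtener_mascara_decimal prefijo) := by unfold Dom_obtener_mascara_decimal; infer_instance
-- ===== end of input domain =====

-- B builds a single packed integer mask with p leading ones from the clamped prefix and extracts the octets by shift-and-mask,
-- instead of A's greedy per-octet subtract-8 loop (objective: idiomatic; same O(1) cost).

-- ===== PORT A =====
-- loop body of A's `for i in range(4)`; state = (mascara, prefijo)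
def pvStepA (st : List Int × Int) (_i : Int) : List Int × Int :=
  if st.2 ≥ 8 then (st.1 ++ [255], st.2 - 8)
  else if st.2 > 0 then (st.1 ++ [256 - 2 ^ (8 - st.2).toNat], 0)
  else (st.1 ++ [0], st.2)

def obtener_mascara_decimal (prefijo : Int) : List Int :=
  ((PySem.List.pyRange 0 4 1).foldl pvStepA ([], prefijo)).1

-- ===== PORT B =====
def obtener_mascara_decimal_alt (prefijo : Int) : List Int :=
  let p := max 0 (min prefijo 32)
  let m := ((1 <<< p) - 1) <<< (32 - p)
  (PySem.List.pyRange 0 4 1).map (fun i => Int.land (m >>> (24 - 8 * i)) 255)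

-- ===== PRECONDITION & SPEC =====
def Spec_obtener_mascara_decimal (prefijo : Int) (out : List Int) : Prop := out = obtener_mascara_decimal_alt prefijo
instance (prefijo : Int) (out : List Int) : Decidable (Spec_obtener_mascara_decimal prefijo out) := by unfold Spec_obtener_mascara_decimal; infer_instance

-- ===== CLAIM (what is proved, stated in full; the proofs are below) =====
def Claim_equal_obtener_mascara_decimal : Prop := ∀ (prefijo : Int), Dom_obtener_mascara_decimal prefijo → Spec_obtener_mascara_decimal prefijo (obtener_mascara_decimal prefijo)

-- ===== LEMMAS AND PROOFS =====
lemma pvStepA_hi (m : List Int) (p i : Int) (h : 8 ≤ p) :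
    pvStepA (m, p) i = (m ++ [255], p - 8) := by
  simp [pvStepA, h]

lemma pvStepA_lo (m : List Int) (p i : Int) (h : p ≤ 0) :
    pvStepA (m, p) i = (m ++ [0], p) := by
  unfold pvStepA
  rw [if_neg (by omega), if_neg (by omega)]

lemma pyRange4 : PySem.List.pyRange 0 4 1 = [0, 1, 2, 3] := by decide

lemma A_ge32 (p : Int) (h : 32 ≤ p) :
    obtener_mascara_decimal p = [255, 255, 255, 255] := by
  unfold obtener_mascara_decimal
  rw [pyRange4]
  simp only [List.foldl]
  rw [pvStepA_hi [] p 0 (by omega)]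
  rw [pvStepA_hi _ _ 1 (by omega)]
  rw [pvStepA_hi _ _ 2 (by omega)]
  rw [pvStepA_hi _ _ 3 (by omega)]
  simp

lemma A_le0 (p : Int) (h : p ≤ 0) :
    obtener_mascara_decimal p = [0, 0, 0, 0] := by
  unfold obtener_mascara_decimal
  rw [pyRange4]
  simp only [List.foldl]
  rw [pvStepA_lo [] p 0 h]
  rw [pvStepA_lo _ _ 1 h]
  rw [pvStepA_lo _ _ 2 h]
  rw [pvStepA_lo _ _ 3 h]
  simp

lemma alt_ge32 (p : Int) (h : 32 ≤ p) :
    obtener_mascara_decimal_alt p = [255, 255, 255, 255] := by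
  unfold obtener_mascara_decimal_alt
  rw [show max 0 (min p 32) = 32 by omega]
  decide

lemma alt_le0 (p : Int) (h : p ≤ 0) :
    obtener_mascara_decimal_alt p = [0, 0, 0, 0] := by
  unfold obtener_mascara_decimal_alt
  rw [show max 0 (min p 32) = 0 by omega]
  decide

-- ===== VERDICT (by name: the statement is the Claim_ definition above) =====
theorem obtener_mascara_decimal_spec : Claim_equal_obtener_mascara_decimal := by
  intro prefijo _
  unfold Spec_obtener_mascara_decimal
  by_cases h32 : 32 ≤ prefijo
  · rw [A_ge32 _ h32, alt_ge32 _ h32]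
  · by_cases h0 : prefijo ≤ 0
    · rw [A_le0 _ h0, alt_le0 _ h0]
    · have h1 : 1 ≤ prefijo := by omega
      have h2 : prefijo ≤ 31 := by omega
      interval_cases prefijo <;> decide
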